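-- pv_equiv track=rewrite | github.com/garmir/0xANATHEMA | .taskmaster/scripts/autonomous-workflow-loop.py | _manual_parse_todos
-- ===== SOURCE A (Python) =====
-- from typing import Dict, Any, List, Optional, Tuple
--
-- def _manual_parse_todos(solution_text: str) -> List[Dict[str, Any]]:
--     """Manually parse solution text into todo steps"""
--     todos = []
--     lines = solution_text.split('\n')
--
--     step_keywords = ['step', 'steps:', '1.', '2.', '3.', '-', '*', 'first', 'then', 'next', 'finally']
--
--     current_step = ""
--     step_count = 1
--
--     for line in lines:
--         line = line.strip()
--         if not line:
--             continue
--
--         # Check if this looks like a step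
--         is_step = any(keyword in line.lower() for keyword in step_keywords)
--
--         if is_step and len(line) > 10:  # Reasonable step length
--             if current_step:
--                 todos.append({
--                     'id': f"research_step_{step_count}",
--                     'description': current_step.strip(),
--                     'priority': 'high'
--                 })
--                 step_count += 1
--
--             current_step = line
--         elif current_step:
--             current_step += " " + line
--
--     # Add final step
--     if current_step:
--         todos.append({
--             'id': f"research_step_{step_count}",
--             'description': current_step.strip(),
--             'priority': 'high'
--         })
--
--     return todos[:5]  # Limit to 5 steps max
-- ===== SOURCE B (Python) =====
-- _KEYWORDS = ['step', 'steps:', '1.', '2.', '3.', '-', '*', 'first', 'then', 'next', 'finally']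
--
--
-- def _is_step(line):
--     return len(line) > 10 and any(k in line.lower() for k in _KEYWORDS)
--
--
-- def _manual_parse_todos(solution_text):
--     cleaned = [s for s in (l.strip() for l in solution_text.split('\n')) if s]
--     segments = []
--     for t in cleaned:
--         if _is_step(t):
--             segments.append([t])
--         elif segments:
--             segments[-1].append(t)
--     return [{'id': f"research_step_{i + 1}",
--              'description': ' '.join(seg).strip(),
--              'priority': 'high'}
--             for i, seg in enumerate(segments[:5])]
-- ===== Notes on version B (the rewrite author's own statement) =====
-- stated objective: simpler
-- what changed: Replaces A's single loop threading a running current_step string and step_count counter (plus a post-loop flush of the pending step) with a three-stage pipeline: filter the stripped lines, cut them into a list of segments in one pass, then render the first five segments with an enumerate comprehension.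
import Mathlib
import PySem

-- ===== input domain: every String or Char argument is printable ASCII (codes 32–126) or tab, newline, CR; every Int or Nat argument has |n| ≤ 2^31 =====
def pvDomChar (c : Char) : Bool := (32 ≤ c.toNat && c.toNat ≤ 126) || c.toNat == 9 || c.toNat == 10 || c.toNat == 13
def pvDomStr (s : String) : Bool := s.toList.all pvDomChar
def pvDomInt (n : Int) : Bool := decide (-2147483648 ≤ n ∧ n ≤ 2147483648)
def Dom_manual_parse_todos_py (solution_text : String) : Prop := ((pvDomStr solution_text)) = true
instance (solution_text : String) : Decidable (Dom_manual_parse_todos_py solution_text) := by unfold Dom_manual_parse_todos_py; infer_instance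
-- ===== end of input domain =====

-- B replaces A's running-accumulator loop (current_step/step_count threaded through one loop plus a
-- post-loop flush) by a clean-then-segment-then-render pipeline: filter the stripped lines, cut them
-- into segments in one pass, and render the first five segments by a comprehension (objective: simpler).

-- ===== PORT A =====
def pvKeywordsA : List String :=
  ["step", "steps:", "1.", "2.", "3.", "-", "*", "first", "then", "next", "finally"]

def pvTodoA (cnt : Int) (desc : String) : List (String × String) :=
  [("id", "research_step_" ++ PySem.Int.toStr cnt),
   ("description", PySem.Str.strip desc),
   ("priority", "high")]

def pvLoopA : List String → List (List (String × String)) → String → Int →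
    List (List (String × String)) × String × Int
  | [], todos, cur, cnt => (todos, cur, cnt)
  | l :: rest, todos, cur, cnt =>
    let line := PySem.Str.strip l
    if line = "" then pvLoopA rest todos cur cnt
    else
      let isStep := pvKeywordsA.any fun k => PySem.Str.isIn k (PySem.Str.lower line)
      if isStep && decide (PySem.Str.len line > 10) then
        if cur ≠ "" then pvLoopA rest (todos ++ [pvTodoA cnt cur]) line (cnt + 1)
        else pvLoopA rest todos line cnt
      else if cur ≠ "" then pvLoopA rest todos (cur ++ (" " ++ line)) cnt
      else pvLoopA rest todos cur cnt

def manual_parse_todos_py (solution_text : String) : List (List (String × String)) :=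
  -- split('\n'): sep ≠ "" so split? is exact (never none); getD only discharges the Option
  let lines := (PySem.Str.split? solution_text "\n").getD []
  let r := pvLoopA lines [] "" 1
  let todos := if r.2.1 ≠ "" then r.1 ++ [pvTodoA r.2.2 r.2.1] else r.1
  PySem.List.slice todos none (some 5)

-- ===== PORT B =====
def pvKeywordsB : List String :=
  ["step", "steps:", "1.", "2.", "3.", "-", "*", "first", "then", "next", "finally"]

def pvIsStepB (line : String) : Bool :=
  decide (PySem.Str.len line > 10) && pvKeywordsB.any fun k => PySem.Str.isIn k (PySem.Str.lower line)

def pvAddLastB : List (List String) → String → List (List String)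
  | [], _ => []
  | [seg], t => [seg ++ [t]]
  | seg :: rest, t => seg :: pvAddLastB rest t

def pvSegsB : List String → List (List String) → List (List String)
  | [], segs => segs
  | t :: rest, segs =>
    if pvIsStepB t then pvSegsB rest (segs ++ [[t]])
    else if segs.isEmpty then pvSegsB rest segs
    else pvSegsB rest (pvAddLastB segs t)

def pvTodoB (p : Int × List String) : List (String × String) :=
  [("id", "research_step_" ++ PySem.Int.toStr (p.1 + 1)),
   ("description", PySem.Str.strip (PySem.Str.join " " p.2)),
   ("priority", "high")]

def manual_parse_todos_py_alt (solution_text : String) : List (List (String × String)) :=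
  -- split('\n'): sep ≠ "" so split? is exact (never none); getD only discharges the Option
  let cleaned := (((PySem.Str.split? solution_text "\n").getD []).map PySem.Str.strip).filter (· ≠ "")
  let segs := pvSegsB cleaned []
  (PySem.List.enumerate (PySem.List.slice segs none (some 5))).map pvTodoB

-- ===== PRECONDITION & SPEC =====
def Spec_manual_parse_todos_py (solution_text : String) (out : List (List (String × String))) : Prop := out = manual_parse_todos_py_alt solution_text
instance (solution_text : String) (out : List (List (String × String))) : Decidable (Spec_manual_parse_todos_py solution_text out) := by unfold Spec_manual_parse_todos_py; infer_instance

-- ===== CLAIM (what is proved, stated in full; the proofs are below) =====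
def Claim_equal_manual_parse_todos_py : Prop := ∀ (solution_text : String), Dom_manual_parse_todos_py solution_text → Spec_manual_parse_todos_py solution_text (manual_parse_todos_py solution_text)

-- ===== LEMMAS AND PROOFS =====

-- render a segment list as B does
def pvRender (segs : List (List String)) : List (List (String × String)) :=
  (PySem.List.enumerate segs).map pvTodoB

-- A's post-loop flush
def pvFinA (r : List (List (String × String)) × String × Int) : List (List (String × String)) :=
  if r.2.1 ≠ "" then r.1 ++ [pvTodoA r.2.2 r.2.1] else r.1

-- loop-state invariant relating A's (todos, cur, cnt) to B's segment list
def pvInv (todos : List (List (String × String))) (cur : String) (cnt : Int)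
    (segs : List (List String)) : Prop :=
  (segs = [] ∧ todos = [] ∧ cur = "" ∧ cnt = 1) ∨
  (∃ init last, segs = init ++ [last] ∧ last ≠ [] ∧ todos = pvRender init ∧
     cur = PySem.Str.join " " last ∧ cur ≠ "" ∧ cnt = (init.length : Int) + 1)

lemma pvJoin_singleton (t : String) : PySem.Str.join " " [t] = t := by
  rw [← String.toList_inj]
  simp [PySem.Str.toList_join, PySem.Chars.join_singleton]

lemma pvChars_join_append (sep q : List Char) :
    ∀ (ps : List (List Char)), ps ≠ [] →
      PySem.Chars.join sep (ps ++ [q]) = PySem.Chars.join sep ps ++ sep ++ q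
  | [], h => absurd rfl h
  | [p], _ => by simp [PySem.Chars.join_cons_cons, PySem.Chars.join_singleton]
  | p :: p' :: rest, _ => by
    have ih := pvChars_join_append sep q (p' :: rest) (by simp)
    simp only [List.cons_append] at ih ⊢
    rw [PySem.Chars.join_cons_cons, PySem.Chars.join_cons_cons, ih]
    simp

lemma pvJoin_append (last : List String) (t : String) (h : last ≠ []) :
    PySem.Str.join " " (last ++ [t]) = PySem.Str.join " " last ++ (" " ++ t) := by
  rw [← String.toList_inj]
  simp only [PySem.Str.toList_join, String.toList_append, List.map_append, List.map_cons,
    List.map_nil]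
  rw [pvChars_join_append _ _ _ (by simpa using h)]
  simp

lemma pvAddLastB_append (t : String) :
    ∀ (init : List (List String)) (last : List String),
      pvAddLastB (init ++ [last]) t = init ++ [last ++ [t]]
  | [], last => rfl
  | [s], last => rfl
  | s :: s' :: rest, last => by
    simpa [pvAddLastB] using pvAddLastB_append t (s' :: rest) last

lemma pvRender_append_singleton (init : List (List String)) (last : List String) :
    pvRender (init ++ [last]) = pvRender init ++ [pvTodoA ((init.length : Int) + 1) (PySem.Str.join " " last)] := by
  simp [pvRender, PySem.List.enumerate_append, PySem.List.enumerate_cons, pvTodoA, pvTodoB]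

lemma pvCondA_eq (line : String) :
    ((pvKeywordsA.any fun k => PySem.Str.isIn k (PySem.Str.lower line)) &&
      decide (PySem.Str.len line > 10)) = pvIsStepB line := by
  unfold pvIsStepB pvKeywordsA pvKeywordsB
  exact Bool.and_comm _ _

lemma pvMain : ∀ (ls : List String) (todos : List (List (String × String))) (cur : String)
    (cnt : Int) (segs : List (List String)), pvInv todos cur cnt segs →
    pvFinA (pvLoopA ls todos cur cnt) =
      pvRender (pvSegsB ((ls.map PySem.Str.strip).filter (· ≠ "")) segs)
  | [], todos, cur, cnt, segs, hinv => by
    simp only [pvLoopA, List.map_nil, List.filter_nil, pvSegsB]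
    rcases hinv with ⟨hs, ht, hc, _⟩ | ⟨init, last, hs, _, ht, hc, hne, hcnt⟩
    · simp [pvFinA, hs, ht, hc, pvRender]
    · subst hs; subst ht; subst hc; subst hcnt
      rw [pvRender_append_singleton]
      simp [pvFinA, hne]
  | l :: rest, todos, cur, cnt, segs, hinv => by
    simp only [pvLoopA, List.map_cons, List.filter_cons]
    by_cases hline : PySem.Str.strip l = ""
    · rw [if_pos hline, if_neg (by simp [hline])]
      exact pvMain rest todos cur cnt segs hinv
    · rw [if_neg hline,
        if_pos (show (decide (PySem.Str.strip l ≠ "")) = true from by simp [hline]), pvCondA_eq]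
      simp only [pvSegsB]
      by_cases hstep : pvIsStepB (PySem.Str.strip l) = true
      · rw [if_pos hstep, if_pos hstep]
        have htne : PySem.Str.strip l ≠ "" := hline
        rcases hinv with ⟨hs, ht, hc, hcnt⟩ | ⟨init, last, hs, hlne, ht, hc, hne, hcnt⟩
        · subst hs; subst ht; subst hc; subst hcnt
          rw [if_neg (by simp)]
          refine pvMain rest _ _ _ _ (Or.inr ?_)
          exact ⟨[], [PySem.Str.strip l], by simp, by simp, rfl,
            (pvJoin_singleton _).symm, htne, by simp⟩
        · rw [if_pos hne]
          refine pvMain rest _ _ _ _ (Or.inr ?_)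
          refine ⟨init ++ [last], [PySem.Str.strip l], by simp [hs], by simp, ?_,
            (pvJoin_singleton _).symm, htne, by simp; omega⟩
          rw [pvRender_append_singleton, ht, hc, hcnt]
      · rw [if_neg hstep, if_neg hstep]
        rcases hinv with ⟨hs, ht, hc, hcnt⟩ | ⟨init, last, hs, hlne, ht, hc, hne, hcnt⟩
        · subst hs; subst hc
          rw [if_neg (by simp), if_pos (by simp)]
          exact pvMain rest _ _ _ _ (Or.inl ⟨rfl, ht, rfl, hcnt⟩)
        · rw [if_pos hne, if_neg (by simp [hs])]
          rw [hs, pvAddLastB_append]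
          refine pvMain rest _ _ _ _ (Or.inr ?_)
          refine ⟨init, last ++ [PySem.Str.strip l], rfl, by simp,
            ht, ?_, ?_, hcnt⟩
          · rw [pvJoin_append _ _ hlne, hc]
          · intro he
            have h2 := congrArg String.toList he
            simp at h2

lemma pvSlice5 {α : Type} (xs : List α) : PySem.List.slice xs none (some 5) = xs.take 5 := by
  simp [pysem]

lemma pvEnumerate_take {α : Type} :
    ∀ (xs : List α) (n : ℕ) (s : Int),
      (PySem.List.enumerate xs s).take n = PySem.List.enumerate (xs.take n) s
  | _, 0, _ => by simp [PySem.List.enumerate_nil]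
  | [], _ + 1, _ => by simp [PySem.List.enumerate_nil]
  | x :: xs, n + 1, s => by
    simp [PySem.List.enumerate_cons, pvEnumerate_take xs n (s + 1)]

-- ===== VERDICT (by name: the statement is the Claim_ definition above) =====
theorem manual_parse_todos_py_spec : Claim_equal_manual_parse_todos_py := by
  intro solution_text _
  unfold Spec_manual_parse_todos_py
  simp only [manual_parse_todos_py, manual_parse_todos_py_alt]
  have h := pvMain ((PySem.Str.split? solution_text "\n").getD []) [] "" 1 []
    (Or.inl ⟨rfl, rfl, rfl, rfl⟩)
  simp only [pvFinA] at h
  rw [pvSlice5, pvSlice5, h, pvRender, ← List.map_take, pvEnumerate_take]
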